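-- pv_equiv track=rewrite | github.com/dmirop/TFG | venv/TFG.py | retrieve_assignments
-- ===== SOURCE A (Python) =====
-- def retrieve_assignments(chromosome):
--     assigns = []
--     nurse_assign = []
--     for gene in chromosome:
--         if gene >= 0:
--             nurse_assign.append(gene)
--         else:
--             assigns.append(nurse_assign)
--             nurse_assign = []
--     assigns.append(nurse_assign)
--
--     return assigns
-- ===== SOURCE B (Python) =====
-- def retrieve_assignments(chromosome):
--     positions = [i for i, g in enumerate(chromosome) if g < 0]
--     assigns = []
--     start = 0
--     for pos in positions:
--         assigns.append(chromosome[start:pos])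
--         start = pos + 1
--     assigns.append(chromosome[start:])
--     return assigns
-- ===== Notes on version B (the rewrite author's own statement) =====
-- stated objective: alternative
-- what changed: B first collects the indices of negative genes, then emits each segment as a slice chromosome[start:pos] (plus the trailing slice), instead of A's single pass that grows and resets a current-sublist accumulator.
import Mathlib
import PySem

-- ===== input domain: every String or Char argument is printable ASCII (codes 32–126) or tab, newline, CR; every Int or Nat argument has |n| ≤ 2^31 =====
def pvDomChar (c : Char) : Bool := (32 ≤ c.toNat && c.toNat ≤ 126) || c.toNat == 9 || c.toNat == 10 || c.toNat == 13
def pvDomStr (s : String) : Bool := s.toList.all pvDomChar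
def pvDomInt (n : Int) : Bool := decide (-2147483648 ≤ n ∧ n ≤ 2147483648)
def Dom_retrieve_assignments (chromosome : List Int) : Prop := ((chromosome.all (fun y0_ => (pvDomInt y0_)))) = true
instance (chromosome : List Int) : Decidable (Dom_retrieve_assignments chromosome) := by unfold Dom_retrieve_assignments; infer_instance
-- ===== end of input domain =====

-- B collects the indices of negative genes and emits the segments as slices; A grows and
-- resets a current-sublist accumulator in one pass. Same cost; alternative decomposition.

-- ===== PORT A =====
def retrieve_assignments (chromosome : List Int) : List (List Int) :=
  let s := chromosome.foldl
    (fun (st : List (List Int) × List Int) gene =>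
      if gene ≥ 0 then (st.1, st.2 ++ [gene]) else (st.1 ++ [st.2], []))
    ([], [])
  s.1 ++ [s.2]

-- ===== PORT B =====
def retrieve_assignments_alt (chromosome : List Int) : List (List Int) :=
  let positions := ((PySem.List.enumerate chromosome).filter (fun p => decide (p.2 < 0))).map (fun p => p.1)
  let s := positions.foldl
    (fun (st : List (List Int) × Int) pos =>
      (st.1 ++ [PySem.List.slice chromosome (some st.2) (some pos)], pos + 1))
    ([], 0)
  s.1 ++ [PySem.List.slice chromosome (some s.2) none]

-- ===== PRECONDITION & SPEC =====
def Spec_retrieve_assignments (chromosome : List Int) (out : List (List Int)) : Prop := out = retrieve_assignments_alt chromosome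
instance (chromosome : List Int) (out : List (List Int)) : Decidable (Spec_retrieve_assignments chromosome out) := by unfold Spec_retrieve_assignments; infer_instance

-- ===== CLAIM (what is proved, stated in full; the proofs are below) =====
def Claim_equal_retrieve_assignments : Prop := ∀ (chromosome : List Int), Dom_retrieve_assignments chromosome → Spec_retrieve_assignments chromosome (retrieve_assignments chromosome)

-- ===== LEMMAS AND PROOFS =====

-- Reference: structural splitter both ports are proved equal to.
def splitRef : List Int → List (List Int)
  | [] => [[]]
  | g :: t =>
    if g < 0 then [] :: splitRef t
    else match splitRef t with
      | [] => [[g]]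
      | h :: r => (g :: h) :: r

def consHead (cur : List Int) : List (List Int) → List (List Int)
  | [] => [cur]
  | h :: r => (cur ++ h) :: r

theorem splitRef_ne_nil (xs : List Int) : splitRef xs ≠ [] := by
  cases xs with
  | nil => simp [splitRef]
  | cons g t =>
    simp only [splitRef]
    split
    · simp
    · cases h : splitRef t <;> simp

-- A's loop, generalized over the accumulator.
theorem foldA_eq (xs : List Int) : ∀ (acc : List (List Int)) (cur : List Int),
    (let s := xs.foldl
      (fun (st : List (List Int) × List Int) gene =>
        if gene ≥ 0 then (st.1, st.2 ++ [gene]) else (st.1 ++ [st.2], []))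
      (acc, cur)
     s.1 ++ [s.2]) = acc ++ consHead cur (splitRef xs) := by
  induction xs with
  | nil => intro acc cur; simp [splitRef, consHead]
  | cons g t ih =>
    intro acc cur
    simp only [List.foldl_cons]
    by_cases hg : g ≥ 0
    · rw [if_pos hg]
      rw [ih acc (cur ++ [g])]
      have hne := splitRef_ne_nil t
      cases h : splitRef t with
      | nil => exact absurd h hne
      | cons h0 r =>
        simp [splitRef, h, consHead, not_lt.mpr hg]
    · rw [if_neg hg]
      rw [ih (acc ++ [cur]) []]
      have hne := splitRef_ne_nil t
      cases h : splitRef t with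
      | nil => exact absurd h hne
      | cons h0 r =>
        simp [splitRef, h, consHead, lt_of_not_ge hg]

theorem retrieve_assignments_eq_splitRef (xs : List Int) :
    retrieve_assignments xs = splitRef xs := by
  have h := foldA_eq xs [] []
  cases hsp : splitRef xs with
  | nil => exact absurd hsp (splitRef_ne_nil xs)
  | cons h0 r =>
    rw [hsp] at h
    simpa [retrieve_assignments, consHead] using h

-- B side: the positions-with-slices loop, written structurally.
def bLoop (c : List Int) : List Int → List (List Int) → Int → List (List Int)
  | [], acc, s => acc ++ [PySem.List.slice c (some s) none]
  | p :: ps, acc, s => bLoop c ps (acc ++ [PySem.List.slice c (some s) (some p)]) (p + 1)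

theorem foldB_eq_bLoop (c : List Int) (ps : List Int) :
    ∀ (acc : List (List Int)) (s : Int),
    (let t := ps.foldl
      (fun (st : List (List Int) × Int) pos =>
        (st.1 ++ [PySem.List.slice c (some st.2) (some pos)], pos + 1))
      (acc, s)
     t.1 ++ [PySem.List.slice c (some t.2) none]) = bLoop c ps acc s := by
  induction ps with
  | nil => intro acc s; simp [bLoop]
  | cons p ps ih => intro acc s; simp only [List.foldl_cons]; exact ih _ _

theorem bLoop_acc (c : List Int) (ps : List Int) :
    ∀ (a b : List (List Int)) (s : Int),
    bLoop c ps (a ++ b) s = a ++ bLoop c ps b s := by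
  induction ps with
  | nil => intro a b s; simp [bLoop]
  | cons p ps ih => intro a b s; simp only [bLoop, List.append_assoc]; exact ih _ _ _

-- shifting a slice past the head element
theorem slice_cons_shift (g : Int) (t : List Int) (s p : Int) (hs : 0 ≤ s) (hp : 0 ≤ p) :
    PySem.List.slice (g :: t) (some (s + 1)) (some (p + 1)) = PySem.List.slice t (some s) (some p) := by
  rw [PySem.List.slice_toNat _ (by omega) (by omega), PySem.List.slice_toNat _ hs hp]
  have h1 : (s + 1).toNat = s.toNat + 1 := by omega
  have h2 : (p + 1).toNat = p.toNat + 1 := by omega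
  simp [h1, h2]

theorem slice_cons_shift_none (g : Int) (t : List Int) (s : Int) (hs : 0 ≤ s) :
    PySem.List.slice (g :: t) (some (s + 1)) none = PySem.List.slice t (some s) none := by
  simp only [PySem.List.slice_some_none, List.length_cons]
  have h1 : PySem.List.clampIdx (t.length + 1) (s + 1) = PySem.List.clampIdx t.length s + 1 := by
    simp only [PySem.List.clampIdx, if_neg (by omega : ¬ s + 1 < 0), if_neg (by omega : ¬ s < 0)]
    omega
  simp [h1]

theorem bLoop_shift (g : Int) (t : List Int) (ps : List Int) :
    ∀ (acc : List (List Int)) (s : Int), 0 ≤ s → (∀ p ∈ ps, 0 ≤ p) →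
    bLoop (g :: t) (ps.map (fun p => p + 1)) acc (s + 1) = bLoop t ps acc s := by
  induction ps with
  | nil =>
    intro acc s hs _
    simp [bLoop, slice_cons_shift_none g t s hs]
  | cons p ps ih =>
    intro acc s hs hps
    simp only [List.map_cons, bLoop]
    rw [slice_cons_shift g t s p hs (hps p (by simp))]
    exact ih _ _ (by have := hps p (by simp); omega) (fun q hq => hps q (by simp [hq]))

-- positions of negatives
def posOf (c : List Int) : List Int :=
  ((PySem.List.enumerate c).filter (fun p => decide (p.2 < 0))).map (fun p => p.1)

theorem enumerate_shift (xs : List Int) : ∀ (s : Int),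
    PySem.List.enumerate xs (s + 1) = (PySem.List.enumerate xs s).map (fun p => (p.1 + 1, p.2)) := by
  induction xs with
  | nil => intro s; simp [PySem.List.enumerate_nil]
  | cons x xs ih =>
    intro s
    rw [PySem.List.enumerate_cons, PySem.List.enumerate_cons, ih (s + 1)]
    simp

theorem posOf_cons (g : Int) (t : List Int) :
    posOf (g :: t) = (if g < 0 then [(0 : Int)] else []) ++ (posOf t).map (fun p => p + 1) := by
  unfold posOf
  rw [PySem.List.enumerate_cons, enumerate_shift t 0]
  by_cases hg : g < 0 <;>
    simp [hg, List.filter_map, List.map_map, Function.comp_def]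

theorem posOf_nonneg (c : List Int) : ∀ p ∈ posOf c, 0 ≤ p := by
  induction c with
  | nil => simp [posOf, PySem.List.enumerate_nil]
  | cons g t ih =>
    intro p hp
    rw [posOf_cons] at hp
    rcases List.mem_append.mp hp with h | h
    · split at h <;> simp_all
    · obtain ⟨q, hq, rfl⟩ := List.mem_map.mp h
      have := ih q hq; omega

theorem alt_eq_bLoop (c : List Int) :
    retrieve_assignments_alt c = bLoop c (posOf c) [] 0 := by
  rw [retrieve_assignments_alt]
  exact foldB_eq_bLoop c (posOf c) [] 0

theorem alt_eq_splitRef (xs : List Int) :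
    retrieve_assignments_alt xs = splitRef xs := by
  induction xs with
  | nil =>
    simp [retrieve_assignments_alt, PySem.List.enumerate_nil, splitRef, PySem.List.slice_some_none,
      PySem.List.clampIdx]
  | cons g t ih =>
    rw [alt_eq_bLoop, posOf_cons]
    rw [alt_eq_bLoop] at ih
    by_cases hg : g < 0
    · rw [if_pos hg]
      simp only [List.singleton_append, bLoop]
      have h0 : PySem.List.slice (g :: t) (some 0) (some 0) = ([] : List Int) := by
        rw [PySem.List.slice_toNat _ le_rfl le_rfl]; simp
      rw [h0]
      have hsh := bLoop_shift g t (posOf t) [([] : List Int)] 0 le_rfl (posOf_nonneg t)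
      rw [show ([] : List (List Int)) ++ [([] : List Int)] = [([] : List Int)] from rfl, hsh]
      rw [show [([] : List Int)] = [([] : List Int)] ++ ([] : List (List Int)) from rfl,
        bLoop_acc t (posOf t) [([] : List Int)] [] 0]
      simp [splitRef, hg, ih]
    · rw [if_neg hg]
      cases hps : posOf t with
      | nil =>
        simp only [List.nil_append, List.map_nil, bLoop]
        rw [hps] at ih
        simp only [bLoop] at ih
        have h1 : PySem.List.slice (g :: t) (some 0) none = g :: t := by
          simp [PySem.List.slice_some_none, PySem.List.clampIdx]
        have h2 : PySem.List.slice t (some 0) none = t := by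
          simp [PySem.List.slice_some_none, PySem.List.clampIdx]
        rw [h1]
        rw [h2] at ih
        simp [splitRef, hg, ← ih]
      | cons p ps =>
        have hnn := posOf_nonneg t
        rw [hps] at hnn
        have hp : 0 ≤ p := hnn p (by simp)
        simp only [List.nil_append, List.map_cons, bLoop]
        have h1 : PySem.List.slice (g :: t) (some 0) (some (p + 1)) =
            g :: PySem.List.slice t (some 0) (some p) := by
          rw [PySem.List.slice_toNat _ le_rfl (by omega), PySem.List.slice_toNat _ le_rfl hp]
          have : (p + 1).toNat = p.toNat + 1 := by omega
          simp [this]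
        rw [h1]
        have hsh := bLoop_shift g t ps [g :: PySem.List.slice t (some 0) (some p)] (p + 1)
          (by omega) (fun q hq => hnn q (by simp [hq]))
        rw [hsh]
        rw [hps] at ih
        simp only [bLoop, List.nil_append] at ih
        rw [show [g :: PySem.List.slice t (some 0) (some p)] =
            [g :: PySem.List.slice t (some 0) (some p)] ++ ([] : List (List Int)) from rfl,
          bLoop_acc t ps _ [] (p + 1)]
        rw [show [PySem.List.slice t (some 0) (some p)] =
            [PySem.List.slice t (some 0) (some p)] ++ ([] : List (List Int)) from rfl,
          bLoop_acc t ps _ [] (p + 1)] at ih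
        have hne := splitRef_ne_nil t
        cases hsp : splitRef t with
        | nil => exact absurd hsp hne
        | cons h0 r =>
          rw [hsp] at ih
          simp only [List.singleton_append, List.cons.injEq] at ih
          simp [splitRef, hg, hsp, ih.1, ih.2]

-- ===== VERDICT (by name: the statement is the Claim_ definition above) =====
theorem retrieve_assignments_spec : Claim_equal_retrieve_assignments := by
  intro c _
  unfold Spec_retrieve_assignments
  rw [retrieve_assignments_eq_splitRef, alt_eq_splitRef]
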